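-- pv_equiv track=rewrite | github.com/maxgovers222/AI-Woonscan | app.py | splits_rapport
-- ===== SOURCE A (Python) =====
-- def splits_rapport(rapport: str) -> tuple[str, str]:
--     lijnen    = rapport.split("\n")
--     kopjes    = 0
--     splitpunt = len(lijnen)
--     for i, lijn in enumerate(lijnen):
--         if lijn.startswith("## ") or lijn.startswith("# "):
--             kopjes += 1
--             if kopjes == 3:
--                 splitpunt = i
--                 break
--     preview = "\n".join(lijnen[:splitpunt]).strip()
--     rest    = "\n".join(lijnen[splitpunt:]).strip()
--     return preview, rest
-- ===== SOURCE B (Python) =====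
-- def splits_rapport(rapport: str) -> tuple[str, str]:
--     voor, na, kopjes = [], [], 0
--     for lijn in rapport.split("\n"):
--         if lijn.startswith("## ") or lijn.startswith("# "):
--             kopjes += 1
--         (voor if kopjes < 3 else na).append(lijn)
--     return "\n".join(voor).strip(), "\n".join(na).strip()
-- ===== Notes on version B (the rewrite author's own statement) =====
-- stated objective: simpler
-- what changed: B drops A's find-the-split-index-then-slice structure entirely: a single pass routes each line into the preview or rest accumulator according to an inclusive running heading count, so there is no index, no break and no slicing.
import Mathlib
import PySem

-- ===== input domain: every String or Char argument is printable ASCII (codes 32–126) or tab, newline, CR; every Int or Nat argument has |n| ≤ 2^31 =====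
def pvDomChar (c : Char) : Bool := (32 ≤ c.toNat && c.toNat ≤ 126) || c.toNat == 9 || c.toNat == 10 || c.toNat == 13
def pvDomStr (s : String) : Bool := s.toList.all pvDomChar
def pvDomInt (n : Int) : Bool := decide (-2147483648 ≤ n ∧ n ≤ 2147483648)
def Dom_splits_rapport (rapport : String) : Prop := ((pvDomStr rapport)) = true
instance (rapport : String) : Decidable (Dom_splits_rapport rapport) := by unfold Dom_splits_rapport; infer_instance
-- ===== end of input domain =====

-- B replaces A's find-the-split-index-then-slice structure by a single pass that routes each
-- line into the preview or rest accumulator by an inclusive running heading count (simpler; no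
-- indices, no break, no slicing). Same O(n) cost.

-- ===== PORT A =====
-- A's for-loop with the `kopjes` counter and `break`: returns `some i` at the break,
-- `none` if the loop runs out (then `splitpunt` keeps its initial value `len(lijnen)`)
def pvLoopA : List (Int × String) → Nat → Option Int
  | [], _ => none
  | (i, lijn) :: rest, kopjes =>
    if PySem.Str.startswith lijn "## " || PySem.Str.startswith lijn "# " then
      if kopjes + 1 == 3 then some i else pvLoopA rest (kopjes + 1)
    else pvLoopA rest kopjes

def splits_rapport (rapport : String) : String × String :=
  -- the separator "\n" is a nonempty literal, so Python's split never raises and split? is always `some`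
  let lijnen := (PySem.Str.split? rapport "\n").getD []
  let splitpunt := (pvLoopA (PySem.List.enumerate lijnen 0) 0).getD (PySem.List.len lijnen)
  (PySem.Str.strip (PySem.Str.join "\n" (PySem.List.slice lijnen none (some splitpunt))),
   PySem.Str.strip (PySem.Str.join "\n" (PySem.List.slice lijnen (some splitpunt) none)))

-- ===== PORT B =====
-- Source B's loop body: bump the running count on a heading, then append the line to
-- `voor` while the count is still below 3, else to `na`
def pvStepB (st : Nat × List String × List String) (lijn : String) : Nat × List String × List String :=
  let kopjes := if PySem.Str.startswith lijn "## " || PySem.Str.startswith lijn "# " then st.1 + 1 else st.1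
  if kopjes < 3 then (kopjes, st.2.1 ++ [lijn], st.2.2)
  else (kopjes, st.2.1, st.2.2 ++ [lijn])

def splits_rapport_alt (rapport : String) : String × String :=
  let lijnen := (PySem.Str.split? rapport "\n").getD []
  let st := lijnen.foldl pvStepB (0, [], [])
  (PySem.Str.strip (PySem.Str.join "\n" st.2.1),
   PySem.Str.strip (PySem.Str.join "\n" st.2.2))

-- ===== PRECONDITION & SPEC =====
def Spec_splits_rapport (rapport : String) (out : String × String) : Prop := out = splits_rapport_alt rapport
instance (rapport : String) (out : String × String) : Decidable (Spec_splits_rapport rapport out) := by unfold Spec_splits_rapport; infer_instance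

-- ===== CLAIM (what is proved, stated in full; the proofs are below) =====
def Claim_equal_splits_rapport : Prop := ∀ (rapport : String), Dom_splits_rapport rapport → Spec_splits_rapport rapport (splits_rapport rapport)

-- ===== LEMMAS AND PROOFS =====

-- reference split point: relative position of the third heading, `none` if fewer than three
def pvMNat : List String → Nat → Option Nat
  | [], _ => none
  | l :: ls, k =>
    if PySem.Str.startswith l "## " || PySem.Str.startswith l "# " then
      if k + 1 = 3 then some 0 else (pvMNat ls (k + 1)).map (· + 1)
    else (pvMNat ls k).map (· + 1)

-- A's break-loop over `enumerate ls n` finds exactly index `n + j` where `j` is the reference position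
theorem pvLoopA_eq_pvMNat : ∀ (ls : List String) (n : Int) (k : Nat),
    pvLoopA (PySem.List.enumerate ls n) k = Option.map (fun (j : Nat) => n + (j : Int)) (pvMNat ls k) := by
  intro ls
  induction ls with
  | nil => intro n k; simp [PySem.List.enumerate_nil, pvLoopA, pvMNat]
  | cons l ls ih =>
    intro n k
    rw [PySem.List.enumerate_cons]
    simp only [pvLoopA, pvMNat]
    by_cases hp : (PySem.Str.startswith l "## " || PySem.Str.startswith l "# ") = true
    · rw [if_pos hp, if_pos hp]
      by_cases h3 : k + 1 = 3
      · simp [h3]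
      · rw [if_neg (by simpa using h3), if_neg h3, ih, Option.map_map]
        cases pvMNat ls (k + 1) with
        | none => rfl
        | some j => simp; omega
    · rw [if_neg hp, if_neg hp, ih, Option.map_map]
      cases pvMNat ls k with
      | none => rfl
      | some j => simp; omega

-- once the running count has reached 3, B's fold sends every remaining line to `na`
theorem pvStepB_done : ∀ (ls : List String) (c : Nat) (v na : List String), 3 ≤ c →
    (ls.foldl pvStepB (c, v, na)).2 = (v, na ++ ls) := by
  intro ls
  induction ls with
  | nil => intro c v na _; simp
  | cons l ls ih =>
    intro c v na hc
    simp only [List.foldl_cons, pvStepB]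
    by_cases hp : (PySem.Str.startswith l "## " || PySem.Str.startswith l "# ") = true
    · rw [if_pos hp, if_neg (by omega)]
      rw [ih _ _ _ (by omega)]; simp
    · rw [if_neg hp, if_neg (by omega)]
      rw [ih _ _ _ hc]; simp

-- while the count is below 3, B's fold produces exactly the take/drop at the reference split point
theorem pvStepB_run : ∀ (ls : List String) (k : Nat) (v na : List String), k < 3 →
    (ls.foldl pvStepB (k, v, na)).2 =
      (v ++ ls.take ((pvMNat ls k).getD ls.length), na ++ ls.drop ((pvMNat ls k).getD ls.length)) := by
  intro ls
  induction ls with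
  | nil => intro k v na _; simp [pvMNat]
  | cons l ls ih =>
    intro k v na hk
    simp only [List.foldl_cons, pvStepB, pvMNat]
    by_cases hp : (PySem.Str.startswith l "## " || PySem.Str.startswith l "# ") = true
    · rw [if_pos hp, if_pos hp]
      by_cases h3 : k + 1 = 3
      · rw [if_pos h3, if_neg (by omega)]
        rw [pvStepB_done _ _ _ _ (by omega)]
        simp
      · rw [if_neg h3, if_pos (by omega)]
        rw [ih (k + 1) _ _ (by omega)]
        cases pvMNat ls (k + 1) with
        | none => simp
        | some j => simp
    · rw [if_neg hp, if_pos hk, if_neg hp]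
      rw [ih k _ _ hk]
      cases pvMNat ls k with
      | none => simp
      | some j => simp

-- the two line-level computations agree: A's slices at its split point are B's two accumulators
theorem pvKey (ls : List String) :
    (PySem.List.slice ls none (some ((pvLoopA (PySem.List.enumerate ls 0) 0).getD (PySem.List.len ls))),
     PySem.List.slice ls (some ((pvLoopA (PySem.List.enumerate ls 0) 0).getD (PySem.List.len ls))) none)
    = (ls.foldl pvStepB (0, [], [])).2 := by
  rw [pvStepB_run ls 0 [] [] (by omega), pvLoopA_eq_pvMNat ls 0 0]
  cases h : pvMNat ls 0 with
  | none =>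
    simp only [Option.map_none, Option.getD_none, PySem.List.len]
    rw [PySem.List.slice_to_natCast, PySem.List.slice_from_natCast]
    simp
  | some j =>
    simp only [Option.map_some, Option.getD_some, zero_add]
    rw [PySem.List.slice_to_natCast, PySem.List.slice_from_natCast]
    simp

-- ===== VERDICT (by name: the statement is the Claim_ definition above) =====
theorem splits_rapport_spec : Claim_equal_splits_rapport := by
  intro rapport _
  unfold Spec_splits_rapport splits_rapport splits_rapport_alt
  simp only []
  rw [← pvKey ((PySem.Str.split? rapport "\n").getD [])]
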